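-- pv_equiv track=rewrite | github.com/kjs3047/wiki | wiki_search.py | find_snippet
-- ===== SOURCE A (Python) =====
-- def find_snippet(text: str, terms: list[str]) -> str:
--     lines = [line.strip() for line in text.splitlines() if line.strip()]
--     lowered_terms = [term.lower() for term in terms if term.strip()]
--
--     for line in lines:
--         lowered = line.lower()
--         if any(term in lowered for term in lowered_terms):
--             return line
--
--     return lines[0] if lines else ""
-- ===== SOURCE B (Python) =====
-- def find_snippet(text: str, terms: list[str]) -> str:
--     # Term-major search: for each term find the earliest line index containing
--     # it, keeping the running minimum as a shrinking scan bound (loop order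
--     # swapped relative to a line-major scan).
--     lines = [line.strip() for line in text.splitlines() if line.strip()]
--     best = len(lines)
--     for term in terms:
--         if term.strip():
--             t = term.lower()
--             for i in range(best):
--                 if t in lines[i].lower():
--                     best = i
--                     break
--     if best < len(lines):
--         return lines[best]
--     return lines[0] if lines else ""
-- ===== Notes on version B (the rewrite author's own statement) =====
-- stated objective: alternative
-- what changed: B swaps the loop nesting: instead of A's line-major scan returning the first line where any() term matches, B runs term-major, computing for each term the earliest matching line index with a shrinking upper bound 'best', and indexes the line list with the final minimum.
import Mathlib
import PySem

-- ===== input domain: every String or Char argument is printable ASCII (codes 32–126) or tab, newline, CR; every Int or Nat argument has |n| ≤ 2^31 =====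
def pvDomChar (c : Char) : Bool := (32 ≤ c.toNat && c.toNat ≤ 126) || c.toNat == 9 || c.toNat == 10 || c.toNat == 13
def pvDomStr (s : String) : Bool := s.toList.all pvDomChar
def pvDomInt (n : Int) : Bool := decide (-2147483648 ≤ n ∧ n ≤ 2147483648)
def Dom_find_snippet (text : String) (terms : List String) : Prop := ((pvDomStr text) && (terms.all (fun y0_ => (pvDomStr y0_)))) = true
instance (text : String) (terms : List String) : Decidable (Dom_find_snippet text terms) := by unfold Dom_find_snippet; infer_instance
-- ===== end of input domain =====

-- B swaps the loop nesting: term-major minimum-index search with a shrinking bound instead of A's line-major any()-scan (objective: alternative).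

-- ===== PORT A =====
def aLoop (lowered : List String) : List String → Option String
  | [] => none
  | l :: ls =>
    if lowered.any (fun term => PySem.Str.isIn term (PySem.Str.lower l)) then some l
    else aLoop lowered ls

def find_snippet (text : String) (terms : List String) : String :=
  let lines := ((PySem.Str.splitlines text).filter
      (fun line => PySem.Str.strip line ≠ "")).map PySem.Str.strip
  let lowered_terms := (terms.filter (fun term => PySem.Str.strip term ≠ "")).map PySem.Str.lower
  match aLoop lowered_terms lines with
  | some l => l
  | none => lines.headD ""

-- ===== PORT B =====
-- inner loop: `for i in range(best): if t in lines[i].lower(): best = i; break`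
def bScan (t : String) (lines : List String) (i best : Nat) : Nat :=
  if i < best then
    (if PySem.Str.isIn t (PySem.Str.lower (lines.getD i "")) then i
     else bScan t lines (i + 1) best)
  else best
termination_by best - i

-- outer loop over the raw terms, carrying the running minimum index `best`
def bOuter (lines : List String) : List String → Nat → Nat
  | [], best => best
  | term :: ts, best =>
    if PySem.Str.strip term ≠ "" then
      bOuter lines ts (bScan (PySem.Str.lower term) lines 0 best)
    else bOuter lines ts best

def find_snippet_alt (text : String) (terms : List String) : String :=
  let lines := ((PySem.Str.splitlines text).filter
      (fun line => PySem.Str.strip line ≠ "")).map PySem.Str.strip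
  let best := bOuter lines terms lines.length
  if best < lines.length then lines.getD best ""
  else lines.headD ""

-- ===== PRECONDITION & SPEC =====
def Spec_find_snippet (text : String) (terms : List String) (out : String) : Prop := out = find_snippet_alt text terms
instance (text : String) (terms : List String) (out : String) : Decidable (Spec_find_snippet text terms out) := by unfold Spec_find_snippet; infer_instance

-- ===== CLAIM (what is proved, stated in full; the proofs are below) =====
def Claim_equal_find_snippet : Prop := ∀ (text : String) (terms : List String), Dom_find_snippet text terms → Spec_find_snippet text terms (find_snippet text terms)

-- ===== LEMMAS AND PROOFS =====

-- shorthand for "term t (already lowered) matches line j"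
def qMatch (t : String) (lines : List String) (j : Nat) : Bool :=
  PySem.Str.isIn t (PySem.Str.lower (lines.getD j ""))

lemma bScan_spec (t : String) (lines : List String) (i best : Nat) :
    bScan t lines i best ≤ best ∧
    (bScan t lines i best < best → qMatch t lines (bScan t lines i best) = true) ∧
    (∀ j, i ≤ j → j < bScan t lines i best → qMatch t lines j = false) := by
  fun_induction bScan t lines i best with
  | case1 i h hq =>
    refine ⟨Nat.le_of_lt h, fun _ => by simpa [qMatch] using hq,
      fun j hij hjr => absurd (Nat.lt_of_lt_of_le hjr hij) (Nat.lt_irrefl _)⟩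
  | case2 i h hq ih =>
    obtain ⟨h1, h2, h3⟩ := ih
    refine ⟨h1, h2, fun j hij hjr => ?_⟩
    rcases Nat.eq_or_lt_of_le hij with rfl | hij'
    · simpa [qMatch] using hq
    · exact h3 j hij' hjr
  | case3 i h =>
    exact ⟨Nat.le_refl _, fun hc => absurd hc (Nat.lt_irrefl _), fun j hij hjr => absurd (Nat.lt_of_le_of_lt hij hjr) h⟩

lemma bOuter_le (lines : List String) (ts : List String) (best : Nat) :
    bOuter lines ts best ≤ best := by
  induction ts generalizing best with
  | nil => exact Nat.le_refl _
  | cons term ts ih =>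
    by_cases h : PySem.Str.strip term ≠ ""
    · simpa [bOuter, h] using Nat.le_trans (ih _) (bScan_spec (PySem.Str.lower term) lines 0 best).1
    · simpa [bOuter, h] using ih best

lemma bOuter_match (lines : List String) (ts : List String) (best : Nat)
    (h : bOuter lines ts best < best) :
    ∃ term ∈ ts, PySem.Str.strip term ≠ "" ∧
      qMatch (PySem.Str.lower term) lines (bOuter lines ts best) = true := by
  induction ts generalizing best with
  | nil => exact absurd h (Nat.lt_irrefl _)
  | cons term ts ih =>
    by_cases hne : PySem.Str.strip term ≠ ""
    · simp only [bOuter, if_pos hne] at h ⊢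
      set b' := bScan (PySem.Str.lower term) lines 0 best with hb'
      by_cases hlt : bOuter lines ts b' < b'
      · obtain ⟨t', ht', h1, h2⟩ := ih b' hlt
        exact ⟨t', List.mem_cons_of_mem _ ht', h1, h2⟩
      · have heq : bOuter lines ts b' = b' :=
          Nat.le_antisymm (bOuter_le _ _ _) (Nat.le_of_not_lt hlt)
        refine ⟨term, List.mem_cons_self, hne, ?_⟩
        rw [heq] at h ⊢
        exact (bScan_spec (PySem.Str.lower term) lines 0 best).2.1 h
    · simp only [bOuter, if_neg hne] at h ⊢
      obtain ⟨t', ht', h1, h2⟩ := ih best h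
      exact ⟨t', List.mem_cons_of_mem _ ht', h1, h2⟩

lemma bOuter_none (lines : List String) (ts : List String)
    (term : String) (hmem : term ∈ ts) (hne : PySem.Str.strip term ≠ "") :
    ∀ (best j : Nat), j < bOuter lines ts best →
      qMatch (PySem.Str.lower term) lines j = false := by
  induction ts with
  | nil => cases hmem
  | cons t' ts ih =>
    intro best j hj
    rcases List.mem_cons.mp hmem with rfl | hmem'
    · simp only [bOuter, if_pos hne] at hj
      have hb : bOuter lines ts (bScan (PySem.Str.lower term) lines 0 best) ≤
          bScan (PySem.Str.lower term) lines 0 best := bOuter_le _ _ _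
      exact (bScan_spec (PySem.Str.lower term) lines 0 best).2.2 j (Nat.zero_le _)
        (Nat.lt_of_lt_of_le hj hb)
    · by_cases h' : PySem.Str.strip t' ≠ ""
      · simp only [bOuter, if_pos h'] at hj
        exact ih hmem' _ _ hj
      · simp only [bOuter, if_neg h'] at hj
        exact ih hmem' _ _ hj

-- A's loop is a first-match scan
lemma aLoop_eq_find? (lowered : List String) (ls : List String) :
    aLoop lowered ls = ls.find? (fun l => lowered.any (fun term => PySem.Str.isIn term (PySem.Str.lower l))) := by
  induction ls with
  | nil => rfl
  | cons l ls ih =>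
    cases hcase : lowered.any (fun term => PySem.Str.isIn term (PySem.Str.lower l)) with
    | true => simp only [aLoop, List.find?_cons, hcase, if_true]
    | false => simp only [aLoop, List.find?_cons, hcase, Bool.false_eq_true, if_false, ih]

lemma find?_least {α : Type} (d : α) (p : α → Bool) (l : List α) (m : Nat)
    (hm : m < l.length) (h1 : p (l.getD m d) = true)
    (h2 : ∀ j, j < m → p (l.getD j d) = false) :
    l.find? p = some (l.getD m d) := by
  induction l generalizing m with
  | nil => cases hm
  | cons a l ih =>
    cases m with
    | zero => simp only [List.getD_cons_zero] at h1 ⊢; simp [h1]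
    | succ m =>
      have h0 : p a = false := by simpa using h2 0 (Nat.succ_pos _)
      simp only [List.find?_cons, h0]
      exact ih m (Nat.lt_of_succ_lt_succ hm) (by simpa using h1)
        (fun j hj => by simpa using h2 (j+1) (Nat.succ_lt_succ hj))

-- ===== VERDICT (by name: the statement is the Claim_ definition above) =====
theorem find_snippet_spec : Claim_equal_find_snippet := by
  intro text terms _
  unfold Spec_find_snippet find_snippet find_snippet_alt
  dsimp only
  set lines := ((PySem.Str.splitlines text).filter
      (fun line => PySem.Str.strip line ≠ "")).map PySem.Str.strip with hlines
  set lowered := (terms.filter (fun term => PySem.Str.strip term ≠ "")).map PySem.Str.lower with hlow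
  set m := bOuter lines terms lines.length with hm
  rw [aLoop_eq_find?]
  set p := fun l => lowered.any (fun term => PySem.Str.isIn term (PySem.Str.lower l)) with hp
  by_cases hlt : m < lines.length
  · -- B returns lines[m]; show A's find? is some lines[m]
    have h1 : p (lines.getD m "") = true := by
      obtain ⟨term, hmem, hne, hq⟩ := bOuter_match lines terms lines.length hlt
      simp only [hp, List.any_eq_true]
      exact ⟨PySem.Str.lower term, List.mem_map_of_mem (List.mem_filter.mpr ⟨hmem, by simpa using hne⟩), by simpa [qMatch] using hq⟩
    have h2 : ∀ j, j < m → p (lines.getD j "") = false := by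
      intro j hj
      simp only [hp, List.any_eq_false]
      intro t ht
      obtain ⟨term, hmem', rfl⟩ := List.mem_map.mp ht
      obtain ⟨hmem, hne⟩ := List.mem_filter.mp hmem'
      simpa [qMatch] using bOuter_none lines terms term hmem (by simpa using hne) lines.length j hj
    rw [find?_least "" p lines m hlt h1 h2]
    simp [hlt]
  · -- no term matches anywhere: A's find? is none, both fall back
    have hnone : lines.find? p = none := by
      rw [List.find?_eq_none]
      intro x hx
      obtain ⟨j, hj, hxj⟩ := List.mem_iff_getElem.mp hx
      have hjm : j < m := Nat.lt_of_lt_of_le hj (by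
        have := Nat.le_antisymm (bOuter_le lines terms lines.length) (Nat.le_of_not_lt hlt)
        omega)
      have hfalse : p (lines.getD j "") = false := by
        simp only [hp, List.any_eq_false]
        intro t ht
        obtain ⟨term, hmem', rfl⟩ := List.mem_map.mp ht
        obtain ⟨hmem, hne⟩ := List.mem_filter.mp hmem'
        simpa [qMatch] using bOuter_none lines terms term hmem (by simpa using hne) lines.length j hjm
      rw [List.getD_eq_getElem _ _ hj, hxj] at hfalse
      simp [hp] at hfalse ⊢
      exact hfalse
    rw [hnone]
    simp [hlt]
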